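-- pv_equiv track=rewrite | github.com/nobe0716/problem_solving | leetcode/x-of-a-kind-in-a-deck-of-cards.py | hasGroupsSizeX
-- ===== SOURCE A (Python) =====
-- import math
-- from collections import Counter
-- from typing import List
--
-- def hasGroupsSizeX(deck: List[int]) -> bool:
--     c = Counter(deck)
--     cards = list(reversed(c.most_common()))
--     if cards[0][1] < 2:
--         return False
--     gcd = cards[0][1]
--     for e in cards:
--         gcd = math.gcd(gcd, e[1])
--     return gcd > 1
-- ===== SOURCE B (Python) =====
-- from collections import Counter
-- from typing import List
--
-- def hasGroupsSizeX(deck: List[int]) -> bool: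
--     counts = list(Counter(deck).values())
--     m = sorted(counts)[0]
--     return any(all(v % d == 0 for v in counts) for d in range(2, m + 1))
-- ===== Notes on version B (the rewrite author's own statement) =====
-- stated objective: alternative
-- what changed: Replaces A's gcd reduction over the sorted-and-reversed count list with a direct search for a group size d in [2, min count] that divides every multiplicity.
import Mathlib
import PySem

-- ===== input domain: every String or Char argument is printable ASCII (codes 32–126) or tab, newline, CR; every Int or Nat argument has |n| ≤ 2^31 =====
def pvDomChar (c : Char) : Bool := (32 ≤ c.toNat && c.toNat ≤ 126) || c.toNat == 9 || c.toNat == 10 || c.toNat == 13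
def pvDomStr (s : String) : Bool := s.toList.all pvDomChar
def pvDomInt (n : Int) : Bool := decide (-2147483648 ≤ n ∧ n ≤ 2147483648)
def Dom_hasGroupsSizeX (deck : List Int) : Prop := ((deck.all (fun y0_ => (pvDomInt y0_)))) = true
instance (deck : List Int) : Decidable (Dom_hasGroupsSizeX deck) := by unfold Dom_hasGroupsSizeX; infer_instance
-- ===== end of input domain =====

-- B replaces A's gcd reduction with a divisor search over candidate group sizes (alternative decomposition, same cost class).

-- ===== PORT A =====
def hasGroupsSizeX (deck : List Int) : Bool :=
  let c := PySem.Dict.counter deck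
  let cards := (PySem.List.sorted c.items (fun p => p.2) true).reverse
  match PySem.List.pyGet? cards 0 with
  | none => false  -- IndexError on the empty deck; excluded by Pre_
  | some p0 =>
    if p0.2 < 2 then false
    else decide ((cards.foldl (fun g e => ((Int.gcd g e.2 : Nat) : Int)) p0.2) > 1)

-- ===== PORT B =====
def hasGroupsSizeX_alt (deck : List Int) : Bool :=
  let counts := (PySem.Dict.counter deck).values
  match PySem.List.pyGet? (PySem.List.sorted counts (fun v => v) false) 0 with
  | none => false  -- IndexError on the empty deck; excluded by Pre_
  | some m =>
    (PySem.List.pyRange 2 (m + 1) 1).any (fun d => counts.all (fun v => PySem.Int.mod v d == 0))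

-- ===== PRECONDITION & SPEC =====
-- Pre_ excludes only the empty deck, on which both Pythons raise IndexError.
def Pre_hasGroupsSizeX (deck : List Int) : Prop := deck ≠ []
instance (deck : List Int) : Decidable (Pre_hasGroupsSizeX deck) := by unfold Pre_hasGroupsSizeX; infer_instance
def pvWitness_hasGroupsSizeX : List Int := [1, 1]

def Spec_hasGroupsSizeX (deck : List Int) (out : Bool) : Prop := out = hasGroupsSizeX_alt deck
instance (deck : List Int) (out : Bool) : Decidable (Spec_hasGroupsSizeX deck out) := by unfold Spec_hasGroupsSizeX; infer_instance

-- ===== CLAIM (what is proved, stated in full; the proofs are below) =====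
def Claim_equal_hasGroupsSizeX : Prop := ∀ (deck : List Int), Dom_hasGroupsSizeX deck → Pre_hasGroupsSizeX deck → Spec_hasGroupsSizeX deck (hasGroupsSizeX deck)

-- ===== LEMMAS AND PROOFS =====

-- the gcd fold of A, characterised by divisibility
theorem pvFoldGcd_dvd_init (l : List (Int × Int)) (a : Int) :
    (l.foldl (fun g e => ((Int.gcd g e.2 : Nat) : Int)) a) ∣ a := by
  induction l generalizing a with
  | nil => exact dvd_rfl
  | cons p t ih =>
      simp only [List.foldl_cons]
      exact (ih _).trans (Int.gcd_dvd_left _ _)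

theorem pvFoldGcd_dvd_mem (l : List (Int × Int)) (a : Int) (p : Int × Int) (hp : p ∈ l) :
    (l.foldl (fun g e => ((Int.gcd g e.2 : Nat) : Int)) a) ∣ p.2 := by
  induction l generalizing a with
  | nil => cases hp
  | cons q t ih =>
      simp only [List.foldl_cons]
      rcases List.mem_cons.mp hp with h | h
      · subst h
        exact (pvFoldGcd_dvd_init t _).trans (Int.gcd_dvd_right _ _)
      · exact ih _ h

theorem pvDvd_foldGcd (l : List (Int × Int)) (a d : Int) (ha : d ∣ a)
    (hl : ∀ p ∈ l, d ∣ p.2) :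
    d ∣ (l.foldl (fun g e => ((Int.gcd g e.2 : Nat) : Int)) a) := by
  induction l generalizing a with
  | nil => exact ha
  | cons q t ih =>
      simp only [List.foldl_cons]
      exact ih _ (Int.dvd_coe_gcd ha (hl q (List.mem_cons_self))) (fun p hp => hl p (List.mem_cons_of_mem _ hp))

theorem pvFoldGcd_nonneg (l : List (Int × Int)) (a : Int) (ha : 0 ≤ a) :
    0 ≤ (l.foldl (fun g e => ((Int.gcd g e.2 : Nat) : Int)) a) := by
  induction l generalizing a with
  | nil => exact ha
  | cons q t ih =>
      simp only [List.foldl_cons]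
      exact ih _ (Int.natCast_nonneg _)

-- every value of Counter(deck) is a positive count
theorem pvCounterValuesPos (deck : List Int) (v : Int)
    (hv : v ∈ (PySem.Dict.counter deck).values) : 1 ≤ v := by
  have : (PySem.Dict.counter deck).values
      = ((PySem.Set.ofList deck).map (fun k => (k, (deck.count k : Int)))).map (fun p => p.2) := by
    simp [PySem.Dict.values, PySem.Dict.items_counter]
  rw [this, List.map_map] at hv
  rcases List.mem_map.mp hv with ⟨k, hk, rfl⟩
  have hkmem : k ∈ deck := (PySem.Set.mem_ofList _ _).mp hk
  have : 0 < deck.count k := List.count_pos_iff.mpr hkmem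
  simp only [Function.comp]
  omega

theorem pvCounterValuesNe (deck : List Int) (h : deck ≠ []) :
    (PySem.Dict.counter deck).values ≠ [] := by
  rcases List.exists_mem_of_ne_nil deck h with ⟨x, hx⟩
  have : (x, (deck.count x : Int)) ∈ (PySem.Dict.counter deck).items := by
    rw [PySem.Dict.items_counter]
    exact List.mem_map.mpr ⟨x, (PySem.Set.mem_ofList _ _).mpr hx, rfl⟩
  intro hnil
  have : ((deck.count x : Int)) ∈ (PySem.Dict.counter deck).values :=
    List.mem_map.mpr ⟨_, this, rfl⟩
  rw [hnil] at this
  cases this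

-- membership bridge: pairs of "cards" are exactly the counter's items
theorem pvMemCards (deck : List Int) (p : Int × Int) :
    p ∈ (PySem.List.sorted (PySem.Dict.counter deck).items (fun q => q.2) true).reverse
      ↔ p ∈ (PySem.Dict.counter deck).items := by
  rw [List.mem_reverse, PySem.List.mem_sorted]


theorem pvSndMemValues (deck : List Int) (p : Int × Int)
    (hp : p ∈ (PySem.Dict.counter deck).items) :
    p.2 ∈ (PySem.Dict.counter deck).values :=
  List.mem_map.mpr ⟨p, hp, rfl⟩

theorem pvValuesSnd (deck : List Int) (v : Int)
    (hv : v ∈ (PySem.Dict.counter deck).values) :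
    ∃ p ∈ (PySem.Dict.counter deck).items, p.2 = v := by
  rcases List.mem_map.mp hv with ⟨p, hp, rfl⟩
  exact ⟨p, hp, rfl⟩

-- ===== VERDICT (by name: the statement is the Claim_ definition above) =====
theorem hasGroupsSizeX_spec : Claim_equal_hasGroupsSizeX := by
  intro deck _ hpre
  unfold Spec_hasGroupsSizeX hasGroupsSizeX hasGroupsSizeX_alt
  dsimp only
  set counts := (PySem.Dict.counter deck).values with hcounts
  set cards := (PySem.List.sorted (PySem.Dict.counter deck).items (fun q => q.2) true).reverse with hcards
  have hcne : counts ≠ [] := pvCounterValuesNe deck hpre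
  have hcardsne : cards ≠ [] := by
    intro h
    rcases List.exists_mem_of_ne_nil counts hcne with ⟨v, hv⟩
    rcases pvValuesSnd deck v hv with ⟨p, hp, rfl⟩
    have := (pvMemCards deck p).mpr hp
    rw [← hcards] at this; rw [h] at this; cases this
  have hsne : PySem.List.sorted counts (fun v => v) false ≠ [] := by
    intro h
    have := PySem.List.length_sorted (xs := counts) (key := fun v => v) (rev := false)
    rw [h] at this
    exact hcne (List.eq_nil_of_length_eq_zero this.symm)
  rcases List.exists_cons_of_ne_nil hcardsne with ⟨p0, ct, hct⟩
  rcases List.exists_cons_of_ne_nil hsne with ⟨m, st, hst⟩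
  rw [hct, hst, PySem.List.pyGet?_zero_cons, PySem.List.pyGet?_zero_cons]
  rw [← hct]
  show (if p0.2 < 2 then false
      else decide ((cards.foldl (fun g e => ((Int.gcd g e.2 : Nat) : Int)) p0.2) > 1))
    = ((PySem.List.pyRange 2 (m + 1) 1).any
        (fun d => counts.all (fun v => PySem.Int.mod v d == 0)))
  -- facts about p0 and m
  have hp0mem : p0 ∈ cards := by rw [hct]; exact List.mem_cons_self
  have hp0items : p0 ∈ (PySem.Dict.counter deck).items := (pvMemCards deck p0).mp hp0mem
  have hp0v : p0.2 ∈ counts := pvSndMemValues deck p0 hp0items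
  have hp0pos : 1 ≤ p0.2 := pvCounterValuesPos deck _ hp0v
  have hmmem : m ∈ counts := by
    have : m ∈ PySem.List.sorted counts (fun v => v) false := by rw [hst]; exact List.mem_cons_self
    exact (PySem.List.mem_sorted _ _ _ _).mp this
  have hmpos : 1 ≤ m := pvCounterValuesPos deck _ hmmem
  set G := cards.foldl (fun g e => ((Int.gcd g e.2 : Nat) : Int)) p0.2 with hG
  have hGdvd : ∀ v ∈ counts, G ∣ v := by
    intro v hv
    rcases pvValuesSnd deck v hv with ⟨p, hp, rfl⟩
    exact pvFoldGcd_dvd_mem cards p0.2 p (by rw [hcards]; exact (pvMemCards deck p).mpr hp)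
  have hGpos : 1 ≤ G := by
    have h0 : 0 ≤ G := pvFoldGcd_nonneg cards p0.2 (by omega)
    have hdvd : G ∣ p0.2 := pvFoldGcd_dvd_init cards p0.2
    rcases hdvd with ⟨c, hc⟩
    by_contra h
    have hG0 : G = 0 := by omega
    rw [hG0, zero_mul] at hc
    omega
  -- B's any-condition
  have hBiff : ((PySem.List.pyRange 2 (m + 1) 1).any
      (fun d => counts.all (fun v => PySem.Int.mod v d == 0)) = true)
      ↔ ∃ d : Int, 2 ≤ d ∧ d ≤ m ∧ ∀ v ∈ counts, d ∣ v := by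
    rw [List.any_eq_true]
    constructor
    · rintro ⟨d, hd, hall⟩
      have hd' := PySem.List.mem_pyRange_one.mp hd
      refine ⟨d, by omega, by omega, ?_⟩
      intro v hv
      have := List.all_eq_true.mp hall v hv
      exact PySem.Int.mod_eq_zero_iff_dvd v d |>.mp (by simpa using this)
    · rintro ⟨d, h2, hm, hall⟩
      refine ⟨d, PySem.List.mem_pyRange_one.mpr ⟨by omega, by omega⟩, ?_⟩
      refine List.all_eq_true.mpr (fun v hv => ?_)
      simpa using (PySem.Int.mod_eq_zero_iff_dvd v d).mpr (hall v hv)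
  by_cases hA : p0.2 < 2
  · -- A returns false; show B is false too
    rw [if_pos hA]
    symm
    rw [Bool.eq_false_iff]
    intro hB
    rcases hBiff.mp hB with ⟨d, h2, _, hall⟩
    have : d ∣ p0.2 := hall _ hp0v
    have := Int.le_of_dvd (by omega) this
    omega
  · rw [if_neg hA]
    by_cases hG1 : 1 < G
    · have hB : ((PySem.List.pyRange 2 (m + 1) 1).any
          (fun d => counts.all (fun v => PySem.Int.mod v d == 0))) = true :=
        hBiff.mpr ⟨G, by omega, by
          have := Int.le_of_dvd (by omega) (hGdvd m hmmem); omega, hGdvd⟩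
      rw [hB, decide_eq_true_eq]
      exact hG1
    · have hBfalse : ¬ (∃ d : Int, 2 ≤ d ∧ d ≤ m ∧ ∀ v ∈ counts, d ∣ v) := by
        rintro ⟨d, h2, _, hall⟩
        have hdG : d ∣ G := by
          apply pvDvd_foldGcd
          · exact hall _ hp0v
          · intro p hp
            exact hall _ (pvSndMemValues deck p ((pvMemCards deck p).mp (by rw [hcards] at hp; exact hp)))
        have := Int.le_of_dvd (by omega) hdG
        omega
      have : ((PySem.List.pyRange 2 (m + 1) 1).any
          (fun d => counts.all (fun v => PySem.Int.mod v d == 0))) = false := by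
        rw [Bool.eq_false_iff]; intro h; exact hBfalse (hBiff.mp h)
      rw [this, decide_eq_false_iff_not]
      omega
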